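-- pv_equiv track=rewrite | github.com/bag-cnag/vcfLoader | python/rdconnect/combine.py | create_batches_by_family
-- ===== SOURCE A (Python) =====
-- def create_batches_by_family( experiments, size = 1000 ):
--     rst = []
--     mtx = 0
--     while len( experiments ) > 0:
--         batch = []
--         cnt = 0
--         while cnt <= size and len( experiments ) > 0:
--             fam = experiments[ 0 ][ 2 ]
--             exp_fam = [ x for x in experiments if x[ 2 ] == fam ]
--             for x in exp_fam:
--                 x.append('mtx' + str(mtx))
--             batch += exp_fam
--             cnt += len( exp_fam )
--             experiments = [ x for x in experiments if x[ 2 ] != fam ]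
--         batch.sort(key = lambda x: x[ 0 ])
--         rst += batch
--         mtx += 1
--     return rst
-- ===== SOURCE B (Python) =====
-- def create_batches_by_family(experiments, size=1000):
--     # One pass: group experiments by family (first-appearance order) via a dict,
--     # then sweep the family groups once, closing a batch when its count exceeds size.
--     # Unlike A, this does not mutate the input lists (returned value is the same).
--     groups = {}
--     for fam, x in [(e[2], e) for e in experiments]:
--         groups.setdefault(fam, []).append(x)
--     rst = []
--     batch = []
--     cnt = 0
--     mtx = 0
--     for fam, grp in groups.items():
--         if cnt > size:
--             batch.sort(key=lambda x: x[0])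
--             rst += batch
--             batch = []
--             cnt = 0
--             mtx += 1
--         batch += [x + ['mtx' + str(mtx)] for x in grp]
--         cnt += len(grp)
--     if batch:
--         batch.sort(key=lambda x: x[0])
--         rst += batch
--     return rst
-- ===== Notes on version B (the rewrite author's own statement) =====
-- stated objective: alternative
-- what changed: B groups experiments by family in one dict-building pass and then sweeps the family groups once to cut size-bounded batches, instead of A's repeated whole-list filtering for every family; B also builds new tagged lists instead of mutating the input in place (return value is identical).
import Mathlib
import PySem

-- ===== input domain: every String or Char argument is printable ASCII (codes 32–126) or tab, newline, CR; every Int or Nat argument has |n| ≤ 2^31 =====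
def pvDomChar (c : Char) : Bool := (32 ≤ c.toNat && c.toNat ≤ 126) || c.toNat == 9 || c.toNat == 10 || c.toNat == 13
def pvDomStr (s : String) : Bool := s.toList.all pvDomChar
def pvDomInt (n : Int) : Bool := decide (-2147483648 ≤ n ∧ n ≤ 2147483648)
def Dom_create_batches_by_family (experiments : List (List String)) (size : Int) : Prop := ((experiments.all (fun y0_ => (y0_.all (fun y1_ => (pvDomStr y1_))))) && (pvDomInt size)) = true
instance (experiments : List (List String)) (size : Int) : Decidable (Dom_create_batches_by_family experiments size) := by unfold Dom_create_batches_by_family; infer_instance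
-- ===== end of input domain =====

-- B replaces A's repeated whole-list filtering with one dict-grouping pass followed by one sweep
-- over the family groups (objective: alternative). Equivalence is about the RETURN value only: the
-- Python A mutates the input's inner lists in place (x.append), while B builds new tagged lists.

-- ===== PORT A =====
-- experiments[0][2] / x[2] (IndexError = none, excluded by Pre_)
def pvFamA (x : List String) : String := (PySem.List.pyGet? x 2).getD ""
-- sort key lambda x: x[0]
def pvKey0A (x : List String) : String := (PySem.List.pyGet? x 0).getD ""

-- inner while loop: state (experiments, batch, cnt); returns (experiments, batch)
def pvInnerA (size mtx : Int) : List (List String) → List (List String) → Int → (List (List String) × List (List String))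
  | [], batch, _ => ([], batch)
  | h :: t, batch, cnt =>
    if cnt ≤ size then
      pvInnerA size mtx ((h :: t).filter (fun x => pvFamA x != pvFamA h))
        (batch ++ ((h :: t).filter (fun x => pvFamA x == pvFamA h)).map (fun x => x ++ ["mtx" ++ PySem.Int.toStr mtx]))
        (cnt + (((h :: t).filter (fun x => pvFamA x == pvFamA h)).length : Int))
    else (h :: t, batch)
  termination_by exps _ _ => exps.length
  decreasing_by
    simp only [List.filter_cons, bne_self_eq_false, if_neg, Bool.false_eq_true, not_false_eq_true,
      List.length_cons]
    exact Nat.lt_succ_of_le (List.length_filter_le _ _)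

-- outer while loop: state (experiments, rst, mtx).  The 'else' branch of the dite is unreachable
-- for 0 ≤ size (the inner loop always consumes at least experiments[0]'s family); it only makes
-- the recursion total (the Python diverges for size < 0, which Pre_ excludes).
def pvOuterA (size : Int) : List (List String) → List (List String) → Int → List (List String)
  | [], rst, _ => rst
  | h :: t, rst, mtx =>
    if hlt : (pvInnerA size mtx (h :: t) [] 0).1.length < (h :: t).length then
      pvOuterA size (pvInnerA size mtx (h :: t) [] 0).1
        (rst ++ PySem.List.sorted (pvInnerA size mtx (h :: t) [] 0).2 pvKey0A) (mtx + 1)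
    else rst ++ PySem.List.sorted (pvInnerA size mtx (h :: t) [] 0).2 pvKey0A
  termination_by exps _ _ => exps.length
  decreasing_by exact hlt

def create_batches_by_family (experiments : List (List String)) (size : Int) : List (List String) :=
  pvOuterA size experiments [] 0

-- ===== PORT B =====
def pvFamB (x : List String) : String := (PySem.List.pyGet? x 2).getD ""
def pvKey0B (x : List String) : String := (PySem.List.pyGet? x 0).getD ""
-- x + ['mtx' + str(mtx)]
def pvTagB (mtx : Int) (x : List String) : List String := x ++ ["mtx" ++ PySem.Int.toStr mtx]

-- loop body over groups.items(): state (rst, batch, cnt, mtx)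
def pvStepB (size : Int) (st : List (List String) × List (List String) × Int × Int)
    (pr : String × List (List String)) : List (List String) × List (List String) × Int × Int :=
  if size < st.2.2.1 then
    (st.1 ++ PySem.List.sorted st.2.1 pvKey0B, pr.2.map (pvTagB (st.2.2.2 + 1)),
      (pr.2.length : Int), st.2.2.2 + 1)
  else
    (st.1, st.2.1 ++ pr.2.map (pvTagB st.2.2.2), st.2.2.1 + (pr.2.length : Int), st.2.2.2)

def create_batches_by_family_alt (experiments : List (List String)) (size : Int) : List (List String) :=
  let groups := (experiments.map (fun e => (pvFamB e, e))).foldl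
    (fun d p => d.modify p.1 [] (fun v => v ++ [p.2])) PySem.Dict.empty
  let st := groups.items.foldl (pvStepB size) ([], [], 0, 0)
  if st.2.1.isEmpty then st.1 else st.1 ++ PySem.List.sorted st.2.1 pvKey0B

-- ===== PRECONDITION & SPEC =====
-- Pre_ excludes exactly the inputs where the Python A does not return: an element shorter than 3
-- raises IndexError (x[2]), and a nonempty list with size < 0 makes the outer while loop spin forever.
def Pre_create_batches_by_family (experiments : List (List String)) (size : Int) : Prop :=
  (∀ x ∈ experiments, 3 ≤ x.length) ∧ (experiments ≠ [] → 0 ≤ size)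
instance (experiments : List (List String)) (size : Int) : Decidable (Pre_create_batches_by_family experiments size) := by unfold Pre_create_batches_by_family; infer_instance

def pvWitness_create_batches_by_family : List (List String) × Int := ([["e1", "o", "fam1"], ["e2", "o", "fam2"]], 1)

def Spec_create_batches_by_family (experiments : List (List String)) (size : Int) (out : List (List String)) : Prop := out = create_batches_by_family_alt experiments size
instance (experiments : List (List String)) (size : Int) (out : List (List String)) : Decidable (Spec_create_batches_by_family experiments size out) := by unfold Spec_create_batches_by_family; infer_instance

-- ===== CLAIM (what is proved, stated in full; the proofs are below) =====
def Claim_equal_create_batches_by_family : Prop := ∀ (experiments : List (List String)) (size : Int), Dom_create_batches_by_family experiments size → Pre_create_batches_by_family experiments size → Spec_create_batches_by_family experiments size (create_batches_by_family experiments size)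

-- ===== LEMMAS AND PROOFS =====

-- the family groups of a list, in order of first appearance of the family
def pvGroups (l : List (List String)) : List (String × List (List String)) :=
  (PySem.Set.ofList (l.map pvFamA)).map (fun k => (k, l.filter (fun x => pvFamA x == k)))

-- greedy batch cut: groups taken while the running count is still ≤ size
def pvTakeB (size : Int) : Int → List (String × List (List String)) →
    (List (String × List (List String)) × List (String × List (List String)))
  | _, [] => ([], [])
  | cnt, g :: gs =>
    if cnt ≤ size then
      let p := pvTakeB size (cnt + (g.2.length : Int)) gs
      (g :: p.1, p.2)
    else ([], g :: gs)

def pvFlat (mtx : Int) (gs : List (String × List (List String))) : List (List String) :=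
  gs.flatMap (fun g => g.2.map (pvTagB mtx))

theorem pvTakeB_snd_length (size cnt : Int) (gs : List (String × List (List String))) :
    (pvTakeB size cnt gs).2.length ≤ gs.length := by
  induction gs generalizing cnt with
  | nil => simp [pvTakeB]
  | cons g gs ih =>
    simp only [pvTakeB]
    split
    · exact Nat.le_succ_of_le (ih _)
    · simp

-- common reference: batches cut from the group list, tagged and sorted per batch
def pvRunG (size : Int) : List (String × List (List String)) → Int → List (List String)
  | [], _ => []
  | g :: gs, mtx =>
    let p := pvTakeB size ((g.2.length : Int)) gs
    PySem.List.sorted (pvFlat mtx (g :: p.1)) pvKey0A ++ pvRunG size p.2 (mtx + 1)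
  termination_by gs _ => gs.length
  decreasing_by exact Nat.lt_succ_of_le (pvTakeB_snd_length _ _ _)

theorem pvKey0B_eq : pvKey0B = pvKey0A := rfl

theorem pvOfList_filter (l : List String) (p : String → Bool) :
    PySem.Set.ofList (l.filter p) = (PySem.Set.ofList l).filter p := by
  induction l with
  | nil => rfl
  | cons a l ih =>
    by_cases hpa : p a = true
    · rw [List.filter_cons_of_pos hpa, PySem.Set.ofList_cons, PySem.Set.ofList_cons,
        List.filter_cons_of_pos hpa, ih]
      show _ :: List.filter _ (List.filter p (PySem.Set.ofList l)) =
        _ :: List.filter p (List.filter _ (PySem.Set.ofList l))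
      rw [List.filter_filter, List.filter_filter]
      exact congrArg _ (List.filter_congr (fun x _ => Bool.and_comm _ _))
    · rw [List.filter_cons_of_neg hpa, PySem.Set.ofList_cons,
        List.filter_cons_of_neg hpa, ih]
      show List.filter p (PySem.Set.ofList l) = List.filter p (List.filter _ (PySem.Set.ofList l))
      rw [List.filter_filter]
      refine (List.filter_congr (fun x _ => ?_)).symm
      by_cases hxa : x == a
      · have : x = a := eq_of_beq hxa
        subst this
        simp [hpa]
      · simp at hxa
        simp [hxa]

theorem pvGroups_nil : pvGroups [] = [] := rfl

theorem pvGroups_cons (h : List String) (t : List (List String)) :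
    pvGroups (h :: t) =
      (pvFamA h, (h :: t).filter (fun x => pvFamA x == pvFamA h)) ::
        pvGroups ((h :: t).filter (fun x => pvFamA x != pvFamA h)) := by
  have hmapfilter : (List.filter (fun x => pvFamA x != pvFamA h) t).map pvFamA
      = List.filter (fun k => k != pvFamA h) (t.map pvFamA) := by
    rw [List.filter_map]; rfl
  unfold pvGroups
  rw [List.map_cons, PySem.Set.ofList_cons, List.map_cons]
  congr 1
  rw [List.filter_cons_of_neg (by simp), hmapfilter, pvOfList_filter]
  have hsets : (PySem.Set.ofList (t.map pvFamA)).discard (pvFamA h)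
      = List.filter (fun k => k != pvFamA h) (PySem.Set.ofList (t.map pvFamA)) := by
    simp [PySem.Set.discard, bne]
  rw [hsets]
  refine List.map_congr_left (fun k hk => ?_)
  have hkne : k ≠ pvFamA h := by
    have := (List.mem_filter.1 hk).2
    simpa using this
  have h1 : List.filter (fun x => pvFamA x == k) (h :: t)
      = List.filter (fun x => pvFamA x == k) t := by
    refine List.filter_cons_of_neg ?_
    simp
    intro hcontra
    exact hkne hcontra.symm
  have h2 : List.filter (fun x => pvFamA x == k) (List.filter (fun x => pvFamA x != pvFamA h) t)
      = List.filter (fun x => pvFamA x == k) t := by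
    rw [List.filter_filter]
    refine List.filter_congr (fun a _ => ?_)
    by_cases hak : pvFamA a = k
    · simp [hak, hkne]
    · simp [hak]
  rw [h1, h2]

theorem pvGroups_ne_nil (l : List (List String)) (g : String × List (List String))
    (hg : g ∈ pvGroups l) : g.2 ≠ [] := by
  unfold pvGroups at hg
  obtain ⟨k, hk, rfl⟩ := List.mem_map.1 hg
  have hk' : k ∈ l.map pvFamA := (PySem.Set.mem_ofList _ _).1 hk
  obtain ⟨x, hx, rfl⟩ := List.mem_map.1 hk'
  have : x ∈ List.filter (fun y => pvFamA y == pvFamA x) l := by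
    simp [List.mem_filter, hx]
  exact List.ne_nil_of_mem this

theorem pvItems_eq (l : List (List String)) :
    ((l.map (fun e => (pvFamB e, e))).foldl
      (fun d p => d.modify p.1 [] (fun v => v ++ [p.2])) PySem.Dict.empty).items = pvGroups l := by
  set pairs := l.map (fun e => (pvFamB e, e)) with hpairs
  have hkeys : ((pairs.foldl (fun d p => d.modify p.1 [] (fun v => v ++ [p.2]))
      PySem.Dict.empty : PySem.Dict String (List (List String)))).keys
      = PySem.Set.ofList (l.map pvFamA) := by
    rw [PySem.Dict.keys_foldl_modify_key pairs Prod.fst [] (fun d p => (fun v => v ++ [p.2]))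
      PySem.Dict.empty]
    have : pairs.map Prod.fst = l.map pvFamA := by
      simp [hpairs, List.map_map]; exact fun a _ => rfl
    rw [show (PySem.Dict.empty : PySem.Dict String (List (List String))).keys = [] from rfl,
      PySem.Set.update_nil_left, this]
  have hnodup : ((pairs.foldl (fun d p => d.modify p.1 [] (fun v => v ++ [p.2]))
      PySem.Dict.empty : PySem.Dict String (List (List String)))).keys.Nodup :=
    PySem.Dict.nodup_keys_foldl_modify_key pairs Prod.fst [] _ PySem.Dict.empty (by simp)
  rw [PySem.Dict.items_eq_map_keys _ hnodup [], hkeys]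
  refine List.map_congr_left (fun k _ => ?_)
  rw [PySem.Dict.getD_foldl_modify_append pairs PySem.Dict.empty k]
  have hfil : pairs.filter (fun p => p.1 == k) = (l.filter (fun e => pvFamA e == k)).map
      (fun e => (pvFamB e, e)) := by
    rw [hpairs, List.filter_map]; rfl
  rw [show (PySem.Dict.empty : PySem.Dict String (List (List String))).getD k [] = [] from rfl,
    hfil, List.map_map]
  show (k, List.map ((fun x => x.2) ∘ fun e => (pvFamB e, e)) _) = _
  rw [show ((fun (x : String × List String) => x.2) ∘ fun e => (pvFamB e, e)) = id from rfl,
    List.map_id]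

-- characterisation of A's inner loop in terms of the group decomposition
theorem pvInnerA_char (size mtx : Int) (l batch : List (List String)) (cnt : Int) :
    (pvInnerA size mtx l batch cnt).2 = batch ++ pvFlat mtx (pvTakeB size cnt (pvGroups l)).1 ∧
    pvGroups (pvInnerA size mtx l batch cnt).1 = (pvTakeB size cnt (pvGroups l)).2 ∧
    (pvInnerA size mtx l batch cnt).1.length ≤ l.length ∧
    (cnt ≤ size → l ≠ [] → (pvInnerA size mtx l batch cnt).1.length < l.length) := by
  induction l, batch, cnt using pvInnerA.induct size mtx with
  | case1 batch cnt => simp [pvInnerA, pvGroups_nil, pvTakeB, pvFlat]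
  | case2 h t batch cnt hle ih =>
    have htag : (fun x => x ++ ["mtx" ++ PySem.Int.toStr mtx]) = pvTagB mtx := rfl
    have hrest : List.filter (fun x => pvFamA x != pvFamA h) (h :: t)
        = List.filter (fun x => pvFamA x != pvFamA h) t := List.filter_cons_of_neg (by simp)
    have hrlen : (List.filter (fun x => pvFamA x != pvFamA h) (h :: t)).length ≤ t.length := by
      rw [hrest]; exact List.length_filter_le _ _
    rw [pvGroups_cons]
    simp only [pvInnerA, if_pos hle, pvTakeB]
    refine ⟨?_, ?_, ?_, ?_⟩
    · rw [ih.1]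
      simp [pvFlat, htag, List.append_assoc]
    · exact ih.2.1
    · exact Nat.le_succ_of_le (Nat.le_trans ih.2.2.1 hrlen)
    · intro _ _
      exact Nat.lt_succ_of_le (Nat.le_trans ih.2.2.1 hrlen)
  | case3 h t batch cnt hgt =>
    rw [pvGroups_cons]
    simp only [pvInnerA, if_neg hgt, pvTakeB]
    refine ⟨by simp [pvFlat], pvGroups_cons h t, Nat.le_refl _, fun hle _ => absurd hle hgt⟩

-- A's outer loop equals the reference run
theorem pvOuterA_eq (size : Int) (hs : 0 ≤ size) (l rst : List (List String)) (mtx : Int) :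
    pvOuterA size l rst mtx = rst ++ pvRunG size (pvGroups l) mtx := by
  induction l, rst, mtx using pvOuterA.induct size with
  | case1 rst mtx => simp [pvOuterA, pvGroups_nil, pvRunG]
  | case2 h t rst mtx hlt ih =>
    have hchar := pvInnerA_char size mtx (h :: t) [] 0
    simp only [pvOuterA]
    rw [dif_pos hlt]
    rw [ih]
    rw [pvGroups_cons] at hchar ⊢
    simp only [pvTakeB, if_pos hs, zero_add] at hchar
    simp only [pvRunG]
    rw [hchar.1, hchar.2.1]
    simp [List.append_assoc]
  | case3 h t rst mtx hnlt =>
    have hchar := pvInnerA_char size mtx (h :: t) [] 0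
    exact absurd (hchar.2.2.2 hs (by simp)) hnlt

def pvFinish (st : List (List String) × List (List String) × Int × Int) : List (List String) :=
  if st.2.1.isEmpty then st.1 else st.1 ++ PySem.List.sorted st.2.1 pvKey0B

-- one batch headed by a nonempty group g, rendered as pvRunG's head step
theorem pvRunG_head (size : Int) (g : String × List (List String))
    (gs : List (String × List (List String))) (hg : g.2 ≠ []) (m : Int)
    (R : List (List String)) :
    (match pvTakeB size ((g.2.length : Int)) gs with
     | (a, []) => pvFinish (R, g.2.map (pvTagB m) ++ pvFlat m a, 0, 0)
     | (a, r) => R ++ PySem.List.sorted (g.2.map (pvTagB m) ++ pvFlat m a) pvKey0A ++ pvRunG size r (m + 1))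
      = R ++ pvRunG size (g :: gs) m := by
  simp only [pvRunG]
  have hflat : pvFlat m (g :: (pvTakeB size ((g.2.length : Int)) gs).1)
      = g.2.map (pvTagB m) ++ pvFlat m (pvTakeB size ((g.2.length : Int)) gs).1 := by
    simp [pvFlat]
  cases hr : (pvTakeB size ((g.2.length : Int)) gs).2 with
  | nil =>
    have : (pvTakeB size ((g.2.length : Int)) gs) = ((pvTakeB size ((g.2.length : Int)) gs).1, []) := by
      rw [← hr]
    rw [this]
    simp only [pvFinish]
    have hne : (g.2.map (pvTagB m) ++ pvFlat m (pvTakeB size ((g.2.length : Int)) gs).1).isEmpty = false := by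
      cases hgv : g.2 with
      | nil => exact absurd hgv hg
      | cons y ys => simp
    rw [hne]
    simp only [Bool.false_eq_true, if_false, pvRunG, hflat]
    rw [pvKey0B_eq]
    simp
  | cons r rs =>
    have : (pvTakeB size ((g.2.length : Int)) gs) = ((pvTakeB size ((g.2.length : Int)) gs).1, r :: rs) := by
      rw [← hr]
    rw [this]
    simp only [hflat]
    simp [List.append_assoc]

-- B's fold over the groups equals the reference run (from a batch already in progress)
theorem pvFoldB_char (size : Int) (gs : List (String × List (List String)))
    (hne : ∀ g ∈ gs, g.2 ≠ []) (batch : List (List String)) (cnt : Int)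
    (rst : List (List String)) (mtx : Int) :
    pvFinish (gs.foldl (pvStepB size) (rst, batch, cnt, mtx)) =
      (match pvTakeB size cnt gs with
       | (a, []) => pvFinish (rst, batch ++ pvFlat mtx a, 0, 0)
       | (a, r) => rst ++ PySem.List.sorted (batch ++ pvFlat mtx a) pvKey0A ++ pvRunG size r (mtx + 1)) := by
  induction gs generalizing batch cnt rst mtx with
  | nil => simp [pvTakeB, pvFinish, pvFlat]
  | cons g gs ih =>
    have hg : g.2 ≠ [] := hne g (by simp)
    have hne' : ∀ x ∈ gs, x.2 ≠ [] := fun x hx => hne x (List.mem_cons_of_mem _ hx)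
    by_cases hcnt : size < cnt
    · rw [List.foldl_cons]
      have hstep : pvStepB size (rst, batch, cnt, mtx) g
          = (rst ++ PySem.List.sorted batch pvKey0B, g.2.map (pvTagB (mtx + 1)),
             (g.2.length : Int), mtx + 1) := by simp [pvStepB, hcnt]
      rw [hstep, ih hne',
        pvRunG_head size g gs hg (mtx + 1) (rst ++ PySem.List.sorted batch pvKey0B)]
      have htake : pvTakeB size cnt (g :: gs) = ([], g :: gs) := by
        simp [pvTakeB, not_le.2 hcnt]
      rw [htake]
      simp [pvKey0B_eq, pvFlat, List.append_assoc]
    · rw [List.foldl_cons]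
      have hstep : pvStepB size (rst, batch, cnt, mtx) g
          = (rst, batch ++ g.2.map (pvTagB mtx), cnt + (g.2.length : Int), mtx) := by
        simp [pvStepB, hcnt]
      rw [hstep, ih hne']
      rcases hq : pvTakeB size (cnt + (g.2.length : Int)) gs with ⟨a, r⟩
      have htake : pvTakeB size cnt (g :: gs) = (g :: a, r) := by
        simp [pvTakeB, not_lt.1 hcnt, hq]
      rw [htake]
      cases r with
      | nil => simp only [pvFinish, pvFlat, List.flatMap_cons, List.append_assoc]
      | cons r rs => simp [pvFlat, List.append_assoc]

-- the whole of B: dict grouping + fold = the reference run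
theorem pvFoldB_run (size : Int) (hs : 0 ≤ size) (gs : List (String × List (List String)))
    (hne : ∀ g ∈ gs, g.2 ≠ []) :
    pvFinish (gs.foldl (pvStepB size) ([], [], 0, 0)) = pvRunG size gs 0 := by
  rw [pvFoldB_char size gs hne [] 0 [] 0]
  cases gs with
  | nil => simp [pvTakeB, pvRunG, pvFinish, pvFlat]
  | cons g gs =>
    rcases hq : pvTakeB size (0 + (g.2.length : Int)) gs with ⟨a, r⟩
    have hq' : pvTakeB size ((g.2.length : Int)) gs = (a, r) := by rwa [zero_add] at hq
    have htake : pvTakeB size 0 (g :: gs) = (g :: a, r) := by simp [pvTakeB, hs, hq']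
    rw [htake]
    have hhead := pvRunG_head size g gs (hne g (by simp)) 0 []
    rw [hq'] at hhead
    cases r with
    | nil => simpa [pvFlat, List.flatMap_cons] using hhead
    | cons r rs => simpa [pvFlat, List.flatMap_cons, List.append_assoc] using hhead

-- ===== VERDICT (by name: the statement is the Claim_ definition above) =====
theorem create_batches_by_family_spec : Claim_equal_create_batches_by_family := by
  intro experiments size _ hpre
  show create_batches_by_family experiments size = create_batches_by_family_alt experiments size
  cases experiments with
  | nil =>
    simp [create_batches_by_family, create_batches_by_family_alt, pvOuterA,
      show (PySem.Dict.empty : PySem.Dict String (List (List String))).items = [] from rfl]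
  | cons h t =>
    have hs : 0 ≤ size := hpre.2 (by simp)
    have ha : create_batches_by_family (h :: t) size
        = [] ++ pvRunG size (pvGroups (h :: t)) 0 := pvOuterA_eq size hs (h :: t) [] 0
    have hb : create_batches_by_family_alt (h :: t) size
        = pvFinish (((((h :: t).map (fun e => (pvFamB e, e))).foldl
            (fun d p => d.modify p.1 [] (fun v => v ++ [p.2]))
            PySem.Dict.empty).items).foldl (pvStepB size) ([], [], 0, 0)) := rfl
    rw [ha, hb, pvItems_eq, pvFoldB_run size hs _ (pvGroups_ne_nil _), List.nil_append]
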